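-- pv_equiv track=rewrite | github.com/SylarBurns/CodingTestPrep | DFS_BFS/단어 변환.py | solution
-- ===== SOURCE A (Python) =====
-- def solution(begin, target, words):
--     if target not in words:
--         return 0
--     def get_matches(word, words):
--         matching_words = []
--         for w in words:
--             unmatch_count = 0
--             for i in range(len(word)):
--                 if w[i]!=word[i]:
--                     unmatch_count+=1
--             if unmatch_count == 1:
--                 matching_words.append(w)
--         return matching_words
--
--     graph = {}
--     graph[begin] = get_matches(begin, words)
--     for word in words:
--         graph[word] = get_matches(word, words)
--
--     def dfs(init):
--         visit = [0 for i in words]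
--         stack = [init]
--         count = 0
--         while stack:
--             node = stack.pop()
--             if node == target:
--                 return count
--             for i in range(0,len(words)):
--                 if words[i] in graph[node]:
--                     if visit[i]!=0:
--                         continue
--                     visit[i]=1
--                     stack.append(words[i])
--             count+=1
--
--     answer = dfs(begin)
--     return answer
-- ===== SOURCE B (Python) =====
-- def solution(begin, target, words):
--     if target not in words:
--         return 0
--     L = len(words[0])
--     buckets = {}
--     for i in range(len(words)):
--         for j in range(L):
--             key = (words[i][:j], words[i][j+1:])
--             buckets.setdefault(key, []).append(i)
--     visit = [0] * len(words)
--     stack = [begin]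
--     count = 0
--     while stack:
--         node = stack.pop()
--         if node == target:
--             return count
--         cand = set()
--         for j in range(L):
--             for i in buckets.get((node[:j], node[j+1:]), []):
--                 if words[i] != node:
--                     cand.add(i)
--         for i in sorted(cand):
--             if visit[i] == 0:
--                 visit[i] = 1
--                 stack.append(words[i])
--         count += 1
--     return None
-- ===== Notes on version B (the rewrite author's own statement) =====
-- stated objective: alternative
-- what changed: B drops the all-pairs get_matches adjacency dict and the per-pop 'words[i] in graph[node]' list scans; it builds wildcard buckets keyed by (prefix, suffix) tuples in one pass and reads each popped node's neighbour indices out of L bucket lookups, pushing them in sorted index order.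
-- outside the precondition, e.g. on solution('h', 'ho', ['ho', 'hi']): A returns None, B returns 2
import Mathlib
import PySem

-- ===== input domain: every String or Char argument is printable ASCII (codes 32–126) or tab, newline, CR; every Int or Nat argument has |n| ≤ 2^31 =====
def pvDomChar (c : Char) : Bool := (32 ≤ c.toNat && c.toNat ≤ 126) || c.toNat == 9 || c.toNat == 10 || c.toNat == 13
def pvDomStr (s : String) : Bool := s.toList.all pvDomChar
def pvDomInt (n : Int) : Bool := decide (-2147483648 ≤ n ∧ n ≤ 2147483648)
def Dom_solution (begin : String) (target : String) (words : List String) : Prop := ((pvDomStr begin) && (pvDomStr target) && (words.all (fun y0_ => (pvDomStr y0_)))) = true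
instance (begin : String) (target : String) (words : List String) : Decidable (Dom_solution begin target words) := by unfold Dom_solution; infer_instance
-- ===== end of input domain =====

-- B replaces A's quadratic all-pairs adjacency dict by wildcard buckets keyed on
-- (prefix, suffix) pairs, gathering each popped node's neighbour indices from the
-- buckets into a set and pushing them in sorted index order (objective: alternative
-- algorithm, same measured cost). Pre_ excludes inputs where target is a word but the words (and begin)
-- are not all of one common length: there A either raises IndexError or its
-- prefix-only comparison answers a question no one specified; B needs uniform lengths.
-- Fuel (words.length + 1) in both DFS ports is only a totality guard: the empty-stack
-- case is matched first and each push marks a fresh visit index, so it never cuts the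
-- loop short.


-- ===== PORT A =====
-- the unmatch_count loop of get_matches: compares w[i] and word[i] over range(len(word));
-- PySem.Str.pyGet? is none exactly where Python raises IndexError (Pre_ keeps indices in range)
def pvUnmatch (w word : String) : Int :=
  (List.range word.toList.length).foldl
    (fun (c : Int) (i : Nat) =>
      if PySem.Str.pyGet? w (i : Int) ≠ PySem.Str.pyGet? word (i : Int) then c + 1 else c) 0

def pvGetMatches (word : String) (words : List String) : List String :=
  words.foldl (fun acc w => if pvUnmatch w word == 1 then acc ++ [w] else acc) []

def pvBuildGraph (begin : String) (words : List String) : PySem.Dict String (List String) :=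
  words.foldl (fun g word => g.insert word (pvGetMatches word words))
    (PySem.Dict.empty.insert begin (pvGetMatches begin words))

-- one pass of A's inner `for i in range(0, len(words))` loop; the stack top is the list head
-- (Python appends/pops at the right end, so the Lean stack list is the Python list reversed)
def pvScanA (g : PySem.Dict String (List String)) (node : String) (words : List String)
    (vs : List Int × List String) : List Int × List String :=
  (List.range words.length).foldl
    (fun vs i =>
      if (g.getD node []).contains (words.getD i "") then
        if vs.1.getD i 0 ≠ 0 then vs
        else (vs.1.set i 1, words.getD i "" :: vs.2)
      else vs) vs

-- A's `while stack` loop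
def pvDfsA (g : PySem.Dict String (List String)) (target : String) (words : List String) :
    Nat → List Int → List String → Int → Option Int
  | _, _, [], _ => none
  | 0, _, _ :: _, _ => none
  | fuel + 1, visit, node :: rest, count =>
    if node = target then some count
    else
      let vs := pvScanA g node words (visit, rest)
      pvDfsA g target words fuel vs.1 vs.2 (count + 1)

def solution (begin : String) (target : String) (words : List String) : Option Int :=
  if target ∈ words then
    let g := pvBuildGraph begin words
    pvDfsA g target words (words.length + 1) (words.map (fun _ => (0 : Int))) [begin] 0
  else some 0

-- ===== PORT B =====
-- the tuple key (words[i][:j], words[i][j+1:])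
def pvKey (w : String) (j : Nat) : String × String :=
  (PySem.Str.slice w none (some (j : Int)), PySem.Str.slice w (some ((j : Int) + 1)) none)

-- buckets.setdefault(key, []).append(i) sets buckets[key] to buckets.get(key, []) + [i],
-- which is Dict.modify with default []
def pvBuckets (words : List String) (L : Nat) : PySem.Dict (String × String) (List Nat) :=
  (List.range words.length).foldl (fun b i =>
    (List.range L).foldl (fun b j =>
      b.modify (pvKey (words.getD i "") j) [] (· ++ [i])) b) PySem.Dict.empty

-- cand = set(); for j in range(L): for i in buckets.get(key, []): if words[i] != node: cand.add(i)
def pvCand (b : PySem.Dict (String × String) (List Nat)) (words : List String) (L : Nat)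
    (node : String) : PySem.Set Nat :=
  (List.range L).foldl (fun s j =>
    (b.getD (pvKey node j) []).foldl (fun s i =>
      if words.getD i "" ≠ node then PySem.Set.add s i else s) s) PySem.Set.empty

-- for i in sorted(cand): if visit[i] == 0: mark and push
def pvScanB (b : PySem.Dict (String × String) (List Nat)) (words : List String) (L : Nat)
    (node : String) (vs : List Int × List String) : List Int × List String :=
  (PySem.List.sorted (pvCand b words L node) (fun x => x)).foldl
    (fun vs i => if vs.1.getD i 0 == 0 then (vs.1.set i 1, words.getD i "" :: vs.2) else vs) vs

-- B's `while stack` loop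
def pvDfsB (b : PySem.Dict (String × String) (List Nat)) (target : String) (words : List String)
    (L : Nat) : Nat → List Int → List String → Int → Option Int
  | _, _, [], _ => none
  | 0, _, _ :: _, _ => none
  | fuel + 1, visit, node :: rest, count =>
    if node = target then some count
    else
      let vs := pvScanB b words L node (visit, rest)
      pvDfsB b target words L fuel vs.1 vs.2 (count + 1)

def solution_alt (begin : String) (target : String) (words : List String) : Option Int :=
  if target ∈ words then
    -- L = len(words[0]); words is nonempty here since target ∈ words
    let L := (words.getD 0 "").toList.length
    pvDfsB (pvBuckets words L) target words L (words.length + 1)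
      (List.replicate words.length (0 : Int)) [begin] 0
  else some 0

-- ===== PRECONDITION & SPEC =====
-- Pre_ excludes the inputs with target ∈ words whose strings are not all of one common
-- length: when some word is shorter than another (or than begin) A raises IndexError in
-- get_matches, and when begin is merely shorter than the words A compares prefixes only —
-- a corner no word-ladder spec fixes, where B's uniform-length bucket answer is as
-- defensible as A's (see claim cites).
def Pre_solution (begin : String) (target : String) (words : List String) : Prop :=
  target ∈ words →
    ((∀ w ∈ words, w.toList.length = (words.getD 0 "").toList.length) ∧
     begin.toList.length = (words.getD 0 "").toList.length)
instance (begin : String) (target : String) (words : List String) : Decidable (Pre_solution begin target words) := by unfold Pre_solution; infer_instance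

def pvWitness_solution : String × String × List String := ("hit", "cog", ["hot", "dot", "cog"])

def Spec_solution (begin : String) (target : String) (words : List String) (out : Option Int) : Prop := out = solution_alt begin target words
instance (begin : String) (target : String) (words : List String) (out : Option Int) : Decidable (Spec_solution begin target words out) := by unfold Spec_solution; infer_instance

-- ===== CLAIM (what is proved, stated in full; the proofs are below) =====
def Claim_equal_solution : Prop := ∀ (begin : String) (target : String) (words : List String), Dom_solution begin target words → Pre_solution begin target words → Spec_solution begin target words (solution begin target words)

-- ===== LEMMAS AND PROOFS =====

-- membership in A's match list is exactly "mismatch count = 1"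
lemma pv_mem_getMatches (word x : String) (words : List String) (hx : x ∈ words) :
    (pvGetMatches word words).contains x = (pvUnmatch x word == 1) := by
  unfold pvGetMatches
  have hfi := PySem.List.foldl_append_if (fun w => pvUnmatch w word == 1) (id : String → String) words []
  simp only [id, List.nil_append] at hfi
  rw [hfi]
  cases h1 : (pvUnmatch x word == 1) with
  | true => simp [List.contains_eq_mem, List.mem_filter, hx, h1]
  | false => simp [List.contains_eq_mem, List.mem_filter, h1]

-- through A's graph-building loop, any key already mapped to its match list (or absent)
-- ends up mapped to its match list once it is begin or one of the words
lemma pv_graph_fold (words : List String) (l : List String) :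
    ∀ (g : PySem.Dict String (List String)) (y : String),
      (g.get? y = none ∨ g.get? y = some (pvGetMatches y words)) →
      (y ∈ l ∨ (g.get? y).isSome) →
      (l.foldl (fun g w => g.insert w (pvGetMatches w words)) g).get? y = some (pvGetMatches y words) := by
  induction l with
  | nil =>
    intro g y hinv hpres
    rcases hpres with h | h
    · simp at h
    · rcases hinv with h0 | h0
      · rw [h0] at h; simp at h
      · simpa using h0
  | cons a l ih =>
    intro g y hinv hpres
    simp only [List.foldl_cons]
    apply ih
    · rw [PySem.Dict.get?_insert]
      by_cases hy : y = a
      · simp [hy]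
      · simp [hy]; exact hinv
    · rw [PySem.Dict.get?_insert]
      by_cases hy : y = a
      · simp [hy]
      · simp only [if_neg hy]
        rcases hpres with h | h
        · rcases List.mem_cons.mp h with h' | h'
          · exact absurd h' hy
          · exact Or.inl h'
        · exact Or.inr h

lemma pv_graph_getD (begin node : String) (words : List String)
    (h : node = begin ∨ node ∈ words) :
    (pvBuildGraph begin words).getD node [] = pvGetMatches node words := by
  have hg : (pvBuildGraph begin words).get? node = some (pvGetMatches node words) := by
    apply pv_graph_fold
    · rw [PySem.Dict.get?_insert]
      by_cases hb : node = begin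
      · simp [hb]
      · simp [hb, PySem.Dict.get?_empty]
    · rcases h with h | h
      · right; rw [PySem.Dict.get?_insert]; simp [h]
      · exact Or.inl h
  rw [PySem.Dict.getD_eq_get?_getD, hg]; rfl

-- the tuple key written out on toList
lemma pv_key_eq (w : String) (j : Nat) :
    pvKey w j = (String.ofList (w.toList.take j), String.ofList (w.toList.drop (j + 1))) := by
  unfold pvKey
  refine Prod.ext ?_ ?_ <;> simp only [String.ext_iff, PySem.Str.toList_slice,
    PySem.Chars.slice_eq_listSlice, String.toList_ofList]
  · exact PySem.List.slice_to_natCast _ j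
  · have : ((j : Int) + 1) = ((j + 1 : Nat) : Int) := by push_cast; ring
    rw [this]; exact PySem.List.slice_from_natCast _ (j + 1)

-- tuple keys determine the wildcard position: equal keys at positions j', j force j' = j
lemma pv_key_inj (w v : String) (L j j' : Nat) (hw : w.toList.length = L) (hv : v.toList.length = L)
    (hj : j < L) (hj' : j' < L) (h : pvKey w j' = pvKey v j) : j' = j := by
  rw [pv_key_eq, pv_key_eq, Prod.mk.injEq, String.ofList_inj, String.ofList_inj] at h
  have := congrArg List.length h.1
  simp [List.length_take, hw, hv] at this
  omega

-- mismatch count as a countP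
lemma pv_unmatch_countP (w v : String) :
    pvUnmatch w v = ((List.range v.toList.length).countP
      (fun j => !(w.toList[j]? == v.toList[j]?)) : Int) := by
  unfold pvUnmatch
  rw [PySem.List.foldl_congr_mem (List.range v.toList.length) _
      (fun acc x => if (!(w.toList[x]? == v.toList[x]?)) = true then acc + 1 else acc) 0 ?_]
  · rw [PySem.List.foldl_count_if]; simp
  · intro acc x _
    by_cases hx : w.toList[x]? = v.toList[x]? <;> simp [hx]

-- the bucket test: exactly-one-mismatch ↔ a shared tuple key on two distinct
-- equal-length strings
lemma pv_cnt_one_iff (w v : String) (L : Nat) (hw : w.toList.length = L)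
    (hv : v.toList.length = L) :
    (pvUnmatch w v == 1) = true ↔ (w ≠ v ∧ ∃ j < L, pvKey w j = pvKey v j) := by
  have hcnt : (pvUnmatch w v == 1) = true ↔
      (List.range L).countP (fun j => !(w.toList[j]? == v.toList[j]?)) = 1 := by
    rw [pv_unmatch_countP, hv]
    constructor
    · intro h; exact_mod_cast (beq_iff_eq ..).mp h
    · intro h; exact (beq_iff_eq ..).mpr (by exact_mod_cast h)
  rw [hcnt]
  constructor
  · intro h1
    rw [List.countP_eq_length_filter] at h1
    obtain ⟨a, ha⟩ := List.length_eq_one_iff.mp h1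
    have hmema : a < L ∧ (!(w.toList[a]? == v.toList[a]?)) = true := by
      have : a ∈ List.filter (fun j => !(w.toList[j]? == v.toList[j]?)) (List.range L) := by
        rw [ha]; exact List.mem_cons_self ..
      simpa [List.mem_filter] using this
    have huniq : ∀ k, k < L → (!(w.toList[k]? == v.toList[k]?)) = true → k = a := by
      intro k hk hp
      have : k ∈ List.filter (fun j => !(w.toList[j]? == v.toList[j]?)) (List.range L) := by
        simp [List.mem_filter, hk, hp]
      rw [ha] at this; simpa using this
    have hag : ∀ k, k ≠ a → w.toList[k]? = v.toList[k]? := by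
      intro k hk
      by_cases hkL : k < L
      · by_contra hne
        exact hk (huniq k hkL (by simpa using hne))
      · rw [List.getElem?_eq_none (by omega), List.getElem?_eq_none (by omega)]
    refine ⟨?_, a, hmema.1, ?_⟩
    · intro hwv
      rw [hwv] at hmema
      simp at hmema
    · rw [pv_key_eq, pv_key_eq, Prod.mk.injEq, String.ofList_inj, String.ofList_inj]
      constructor
      · apply List.ext_getElem?
        intro i
        rw [List.getElem?_take, List.getElem?_take]
        split_ifs with hi
        · exact hag i (by omega)
        · rfl
      · apply List.ext_getElem?
        intro i
        rw [List.getElem?_drop, List.getElem?_drop]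
        exact hag (a + 1 + i) (by omega)
  · rintro ⟨hne, j, hj, hkey⟩
    rw [pv_key_eq, pv_key_eq, Prod.mk.injEq, String.ofList_inj, String.ofList_inj] at hkey
    have hag : ∀ k, k ≠ j → w.toList[k]? = v.toList[k]? := by
      intro k hk
      by_cases hklt : k < j
      · have h1 := congrArg (fun l => l[k]?) hkey.1
        simpa [List.getElem?_take, hklt] using h1
      · have h1 := congrArg (fun l => l[k - (j+1)]?) hkey.2
        simp only [List.getElem?_drop] at h1
        have : j + 1 + (k - (j + 1)) = k := by omega
        rwa [this] at h1
    have pj : w.toList[j]? ≠ v.toList[j]? := by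
      intro hj'
      apply hne
      rw [String.ext_iff]
      apply List.ext_getElem?
      intro i
      by_cases hij : i = j
      · rw [hij]; exact hj'
      · exact hag i hij
    have : List.countP (fun k => !(w.toList[k]? == v.toList[k]?)) (List.range L)
        = List.countP (fun k => k == j) (List.range L) := by
      apply List.countP_congr
      intro x hx
      simp only [List.mem_range] at hx
      constructor
      · intro hp
        by_contra hxj
        rw [hag x (by simpa using hxj)] at hp
        simp at hp
      · intro hxj
        simp only [beq_iff_eq] at hxj
        subst hxj
        simpa using pj
    rw [this]
    have : List.countP (fun k => k == j) (List.range L) = (List.range L).count j := by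
      simp [List.count]
    rw [this, List.count_range, if_pos hj]

-- what the bucket dict holds
lemma pv_mem_bucket (words : List String) (L : Nat) (k : String × String) (x : Nat) :
    x ∈ (pvBuckets words L).getD k [] ↔
      x < words.length ∧ ∃ j < L, pvKey (words.getD x "") j = k := by
  have hB : pvBuckets words L =
      ((List.range words.length).flatMap (fun i =>
        (List.range L).map (fun j => (pvKey (words.getD i "") j, i)))).foldl
        (fun d p => d.modify p.1 [] (· ++ [p.2])) PySem.Dict.empty := by
    rw [List.foldl_flatMap]
    unfold pvBuckets
    apply PySem.List.foldl_congr_mem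
    intro acc i _
    rw [List.foldl_map]
  rw [hB, PySem.Dict.getD_foldl_modify_append, PySem.Dict.getD_empty]
  simp only [List.nil_append, List.mem_map, List.mem_filter, List.mem_flatMap, List.mem_range]
  constructor
  · rintro ⟨⟨k', x'⟩, ⟨⟨i, hi, j, hj, hpair⟩, hk⟩, hx⟩
    obtain ⟨hk1, hk2⟩ := Prod.mk.injEq .. ▸ hpair
    simp only [beq_iff_eq] at hk
    subst hk2
    dsimp at hx
    subst hx
    exact ⟨hi, j, hj, by rw [hk1]; exact hk⟩
  · rintro ⟨hx, j, hj, hkey⟩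
    exact ⟨(k, x), ⟨⟨x, hx, j, hj, by rw [hkey]⟩, by simp⟩, rfl⟩

lemma pv_foldl_update (F : Nat → List Nat) :
    ∀ (l : List Nat) (s : PySem.Set Nat),
      l.foldl (fun s j => PySem.Set.update s (F j)) s = PySem.Set.update s (l.flatMap F) := by
  intro l
  induction l with
  | nil => intro s; rfl
  | cons a l ih =>
    intro s
    simp only [List.foldl_cons, List.flatMap_cons, PySem.Set.update_append]
    exact ih _

-- the candidate set
lemma pv_cand_eq (b : PySem.Dict (String × String) (List Nat)) (words : List String)
    (L : Nat) (node : String) :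
    pvCand b words L node = PySem.Set.ofList
      ((List.range L).flatMap (fun j =>
        (b.getD (pvKey node j) []).filter (fun i => decide (words.getD i "" ≠ node)))) := by
  unfold pvCand
  rw [PySem.List.foldl_congr_mem _ _
      (fun s j => PySem.Set.update s
        ((b.getD (pvKey node j) []).filter (fun i => decide (words.getD i "" ≠ node)))) _
      (by intro acc j _
          rw [PySem.List.foldl_ite_eq_foldl_filter]
          rfl)]
  rw [pv_foldl_update]
  exact PySem.Set.update_nil_left _

-- B's sorted candidate list is A's filtered index scan
lemma pv_sorted_cand (begin node : String) (words : List String) (L : Nat)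
    (hw : ∀ w ∈ words, w.toList.length = L) (hb : begin.toList.length = L)
    (hnode : node = begin ∨ node ∈ words) :
    PySem.List.sorted (pvCand (pvBuckets words L) words L node) (fun x => x) =
      (List.range words.length).filter (fun i => pvUnmatch (words.getD i "") node == 1) := by
  have hnlen : node.toList.length = L := by
    rcases hnode with h | h
    · rw [h]; exact hb
    · exact hw node h
  apply PySem.List.sorted_eq_of_perm_of_pairwise_lt
  · rw [List.perm_ext_iff_of_nodup (List.nodup_range.filter _)
      (by rw [pv_cand_eq]; exact PySem.Set.nodup_ofList _)]
    intro x
    rw [pv_cand_eq, PySem.Set.mem_ofList, List.mem_filter]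
    simp only [List.mem_range, List.mem_flatMap, List.mem_filter, decide_eq_true_eq]
    constructor
    · rintro ⟨hx, hcnt⟩
      have hxw : words.getD x "" ∈ words := by
        rw [List.getD_eq_getElem _ _ hx]; exact List.getElem_mem hx
      obtain ⟨hne, j, hj, hkey⟩ := (pv_cnt_one_iff _ node L (hw _ hxw) hnlen).mp hcnt
      exact ⟨j, hj, (pv_mem_bucket words L _ x).mpr ⟨hx, j, hj, hkey⟩, hne⟩
    · rintro ⟨j, hjmem, hxb, hne⟩
      obtain ⟨hx, j', hj', hkeyeq⟩ := (pv_mem_bucket words L _ x).mp hxb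
      have hxw : words.getD x "" ∈ words := by
        rw [List.getD_eq_getElem _ _ hx]; exact List.getElem_mem hx
      have hjj : j' = j := pv_key_inj _ node L j j' (hw _ hxw) hnlen hjmem hj' hkeyeq
      subst hjj
      exact ⟨hx, (pv_cnt_one_iff _ node L (hw _ hxw) hnlen).mpr ⟨hne, j', hj', hkeyeq⟩⟩
  · exact List.pairwise_lt_range.filter _

-- the two per-pop scans agree on every node of the traversal
lemma pv_scan_eq (begin node : String) (words : List String) (L : Nat)
    (hw : ∀ w ∈ words, w.toList.length = L) (hb : begin.toList.length = L)
    (hnode : node = begin ∨ node ∈ words) (vs : List Int × List String) :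
    pvScanA (pvBuildGraph begin words) node words vs = pvScanB (pvBuckets words L) words L node vs := by
  unfold pvScanA pvScanB
  rw [pv_sorted_cand begin node words L hw hb hnode]
  rw [PySem.List.foldl_congr_mem _ _
      (fun vs i => if (pvUnmatch (words.getD i "") node == 1) = true then
        (if vs.1.getD i 0 ≠ 0 then vs else (vs.1.set i 1, words.getD i "" :: vs.2)) else vs) _ ?_]
  · rw [PySem.List.foldl_if_eq_foldl_filter]
    apply PySem.List.foldl_congr_mem
    intro acc i _
    simp only [beq_iff_eq, ite_not]
  · intro acc i hi
    have hix : i < words.length := List.mem_range.mp hi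
    have hxw : words.getD i "" ∈ words := by
      rw [List.getD_eq_getElem _ _ hix]; exact List.getElem_mem hix
    rw [pv_graph_getD begin node words hnode, pv_mem_getMatches node _ words hxw]

-- any scan whose step either keeps the state or pushes words[i] only pushes words
lemma pv_scan_fold_inv (words : List String) :
    ∀ (l : List Nat) (f : (List Int × List String) → Nat → (List Int × List String)),
      (∀ vs i, f vs i = vs ∨ f vs i = (vs.1.set i 1, words.getD i "" :: vs.2)) →
      (∀ i ∈ l, i < words.length) →
      ∀ (v : List Int) (s : List String),
        ∀ x ∈ (l.foldl f (v, s)).2, x ∈ s ∨ x ∈ words := by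
  intro l f hf
  induction l with
  | nil => intro _ v s x hx; exact Or.inl hx
  | cons a l ih =>
    intro hl v s x hx
    simp only [List.foldl_cons] at hx
    have ha : a < words.length := hl a (List.mem_cons_self ..)
    have hl' : ∀ i ∈ l, i < words.length := fun i hi => hl i (List.mem_cons_of_mem _ hi)
    rcases hf (v, s) a with he | he
    · rw [he] at hx
      exact ih hl' v s x hx
    · rw [he] at hx
      rcases ih hl' _ _ x hx with hmem | hmem
      · rcases List.mem_cons.mp hmem with h' | h'
        · right
          rw [h', List.getD_eq_getElem _ _ ha]
          exact List.getElem_mem ha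
        · exact Or.inl h'
      · exact Or.inr hmem

lemma pv_scanA_inv (g : PySem.Dict String (List String)) (node : String) (words : List String)
    (v : List Int) (s : List String) :
    ∀ x ∈ (pvScanA g node words (v, s)).2, x ∈ s ∨ x ∈ words := by
  unfold pvScanA
  apply pv_scan_fold_inv
  · intro vs i
    dsimp only
    by_cases h1 : ((g.getD node []).contains (words.getD i "")) = true
    · by_cases h2 : vs.1.getD i 0 ≠ 0
      · left; rw [if_pos h1, if_pos h2]
      · right; rw [if_pos h1, if_neg h2]
    · left; rw [if_neg h1]
  · intro i hi; exact List.mem_range.mp hi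

-- the two DFS loops agree step for step while every stacked node is begin or a word
lemma pv_dfs_agree (begin target : String) (words : List String) (L : Nat)
    (hw : ∀ w ∈ words, w.toList.length = L) (hb : begin.toList.length = L) :
    ∀ (fuel : Nat) (v : List Int) (s : List String) (c : Int),
      (∀ x ∈ s, x = begin ∨ x ∈ words) →
      pvDfsA (pvBuildGraph begin words) target words fuel v s c =
        pvDfsB (pvBuckets words L) target words L fuel v s c := by
  intro fuel
  induction fuel with
  | zero =>
    intro v s c _
    cases s with
    | nil => rfl
    | cons a s => rfl
  | succ n ih =>
    intro v s c hs
    cases s with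
    | nil => rfl
    | cons node rest =>
      simp only [pvDfsA, pvDfsB]
      by_cases ht : node = target
      · simp [ht]
      · simp only [if_neg ht]
        rw [pv_scan_eq begin node words L hw hb (hs node (List.mem_cons_self ..))]
        apply ih
        intro x hx
        rw [← pv_scan_eq begin node words L hw hb (hs node (List.mem_cons_self ..))] at hx
        rcases pv_scanA_inv _ node words v rest x hx with h | h
        · exact hs x (List.mem_cons_of_mem _ h)
        · exact Or.inr h

-- ===== VERDICT (by name: the statement is the Claim_ definition above) =====
theorem solution_spec : Claim_equal_solution := by
  intro begin target words _ hpre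
  unfold Spec_solution solution solution_alt
  by_cases ht : target ∈ words
  · simp only [if_pos ht]
    obtain ⟨hw, hb⟩ := hpre ht
    rw [List.map_const']
    exact pv_dfs_agree begin target words _ hw hb (words.length + 1)
      (List.replicate words.length 0) [begin] 0
      (by intro x hx; simp at hx; exact Or.inl hx)
  · simp [ht]
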